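-- pv_equiv track=rewrite | github.com/Armandur/remarkablecrosswords | app/services/sources/prenly/__init__.py | _filter_instructions
-- ===== SOURCE A (Python) =====
-- def _filter_instructions(instructions: list, gs_names: set[str]) -> list:
--     """Tar rekursivt bort q...Q-block där ett semi-transparent gs är direkt barn (ej nästlat)."""
--     output = []
--     instr = list(instructions)
--     i = 0
--     while i < len(instr):
--         operands, operator = instr[i]
--         if str(operator) == "q":
--             # Hitta matchande Q
--             depth, j = 1, i + 1
--             while j < len(instr) and depth > 0:
--                 s = str(instr[j][1])
--                 if s == "q":
--                     depth += 1
--                 elif s == "Q":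
--                     depth -= 1
--                 j += 1
--             inner = instr[i + 1 : j - 1]
--
--             # Kolla om ett semi-transparent gs är ett DIREKT barn (inte inne i nästlat q...Q)
--             direct_has_overlay_gs = False
--             inner_depth = 0
--             for ops, op2 in inner:
--                 s = str(op2)
--                 if s == "q":
--                     inner_depth += 1
--                 elif s == "Q":
--                     inner_depth -= 1
--                 elif s == "gs" and inner_depth == 0 and ops and str(ops[0]) in gs_names:
--                     direct_has_overlay_gs = True
--                     break
--
--             if direct_has_overlay_gs:
--                 i = j  # kasta detta block
--             else:
--                 output.append(instr[i])        # q
--                 output.extend(_filter_instructions(inner, gs_names))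
--                 output.append(instr[j - 1])    # Q
--                 i = j
--         else:
--             output.append((operands, operator))
--             i += 1
--     return output
-- ===== SOURCE B (Python) =====
-- def _filter_instructions(instructions: list, gs_names) -> list:
--     """Single pass with an explicit stack: pair each q with its Q, track per-level
--     direct overlay gs, and build the filtered output bottom-up."""
--     stack = []            # saved (parent_items, parent_flag, q_item) per open q
--     items, flag = [], False
--     for item in instructions:
--         operands, operator = item
--         s = str(operator)
--         if s == "q":
--             stack.append((items, flag, item))
--             items, flag = [], False
--         elif s == "Q" and stack:
--             parent, pflag, q_item = stack.pop()
--             if not flag:                     # keep this block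
--                 parent.append(q_item)
--                 parent.extend(items)
--                 parent.append(item)
--             items, flag = parent, pflag
--         else:
--             if not flag and s == "gs" and operands and str(operands[0]) in gs_names:
--                 flag = True
--             items.append(item)
--     while stack:   # unmatched q (malformed stream): reattach content unchanged
--         parent, pflag, q_item = stack.pop()
--         parent.append(q_item)
--         parent.extend(items)
--         items = parent
--     return items
-- ===== Notes on version B (the rewrite author's own statement) =====
-- stated objective: alternative
-- what changed: Replaces A's index-jumping scan (find matching Q, separate direct-gs scan of the inner slice, then recurse on the slice) by a single left-to-right pass with an explicit stack that pairs q/Q, tracks a per-level direct-overlay-gs flag, and builds the filtered output bottom-up.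
-- outside the precondition, e.g. on _filter_instructions([([], 'q')], set()): A returns [([], 'q'), ([], 'q')], B returns [([], 'q')]
import Mathlib
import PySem

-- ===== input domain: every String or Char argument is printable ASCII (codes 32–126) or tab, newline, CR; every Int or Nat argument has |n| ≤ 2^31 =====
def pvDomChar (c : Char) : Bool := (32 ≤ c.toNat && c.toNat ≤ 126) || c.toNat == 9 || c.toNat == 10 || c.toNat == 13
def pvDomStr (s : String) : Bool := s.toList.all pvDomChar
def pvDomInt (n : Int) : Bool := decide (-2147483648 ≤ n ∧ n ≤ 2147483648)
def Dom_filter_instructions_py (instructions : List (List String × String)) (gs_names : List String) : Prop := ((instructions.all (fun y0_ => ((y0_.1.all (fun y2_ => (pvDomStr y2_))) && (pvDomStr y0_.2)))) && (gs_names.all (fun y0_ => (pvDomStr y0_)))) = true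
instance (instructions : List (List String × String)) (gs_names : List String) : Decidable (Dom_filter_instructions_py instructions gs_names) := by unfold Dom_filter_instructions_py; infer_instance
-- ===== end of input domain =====

-- B replaces A's find-matching-Q-then-recurse-on-the-slice scheme by one stack-based
-- left-to-right pass that builds the output bottom-up (objective: alternative algorithm).

-- ===== PORT A =====
-- 's == "gs" and inner_depth == 0 … ' guard shared by both Pythons: operator is "gs",
-- operands nonempty, first operand in gs_names (strings, so str() is the identity)
def pvGsHit (gs : List String) (x : List String × String) : Bool :=
  x.2 == "gs" && (match x.1 with | [] => false | o :: _ => gs.contains o)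

-- A's inner while loop: from depth d, consume until depth hits 0; returns (consumed, rest)
def pvScanQ (d : Int) : List (List String × String) → List (List String × String) × List (List String × String)
  | [] => ([], [])
  | x :: xs =>
    let d' := if x.2 = "q" then d + 1 else if x.2 = "Q" then d - 1 else d
    if d' = 0 then ([x], xs)
    else
      let p := pvScanQ d' xs
      (x :: p.1, p.2)

theorem pvScanQ_append (d : Int) (l : List (List String × String)) :
    (pvScanQ d l).1 ++ (pvScanQ d l).2 = l := by
  induction l generalizing d with
  | nil => simp [pvScanQ]
  | cons x xs ih =>
    simp only [pvScanQ]
    by_cases h : (if x.2 = "q" then d + 1 else if x.2 = "Q" then d - 1 else d) = 0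
    · simp only [if_pos h]; simp
    · simp only [if_neg h, List.cons_append, List.cons.injEq, true_and]
      exact ih _

theorem pvScanQ_len (d : Int) (l : List (List String × String)) :
    (pvScanQ d l).1.length + (pvScanQ d l).2.length = l.length := by
  have h := pvScanQ_append d l
  calc (pvScanQ d l).1.length + (pvScanQ d l).2.length
      = ((pvScanQ d l).1 ++ (pvScanQ d l).2).length := by simp
    _ = l.length := by rw [h]

-- A's for-loop over inner: does a semi-transparent gs occur as a direct child?
def pvDirect (gs : List String) : Int → List (List String × String) → Bool
  | _, [] => false
  | d, x :: xs =>
    if x.2 = "q" then pvDirect gs (d + 1) xs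
    else if x.2 = "Q" then pvDirect gs (d - 1) xs
    else if pvGsHit gs x && d == 0 then true
    else pvDirect gs d xs

def filter_instructions_py (instructions : List (List String × String)) (gs_names : List String) : List (List String × String) :=
  match instructions with
  | [] => []
  | x :: rest =>
    if x.2 = "q" then
      let p := pvScanQ 1 rest
      let inner := p.1.dropLast
      if pvDirect gs_names 0 inner then
        filter_instructions_py p.2 gs_names
      else
        x :: (filter_instructions_py inner gs_names ++ p.1.getLastD x :: filter_instructions_py p.2 gs_names)
    else
      x :: filter_instructions_py rest gs_names
termination_by instructions.length
decreasing_by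
  · have := pvScanQ_len 1 rest; simp; omega
  · have h := pvScanQ_len 1 rest
    simp; omega
  · have := pvScanQ_len 1 rest; simp; omega
  · simp

-- ===== PORT B =====
-- stack frame: (parent's accumulated items, parent's flag, the pending q item)
def pvUnwind : List (List (List String × String) × Bool × (List String × String)) → List (List String × String) → List (List String × String)
  | [], items => items
  | f :: st, items => pvUnwind st (f.1 ++ f.2.2 :: items)

def pvLoopB (gs : List String) : List (List String × String) → List (List (List String × String) × Bool × (List String × String)) → List (List String × String) → Bool → List (List String × String)
  | [], stack, items, _flag => pvUnwind stack items
  | x :: xs, stack, items, flag =>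
    if x.2 = "q" then
      pvLoopB gs xs ((items, flag, x) :: stack) [] false
    else if x.2 = "Q" then
      match stack with
      | [] => pvLoopB gs xs [] (items ++ [x]) flag        -- Python's final else branch
      | f :: st => pvLoopB gs xs st (if flag then f.1 else f.1 ++ f.2.2 :: (items ++ [x])) f.2.1
    else
      pvLoopB gs xs stack (items ++ [x]) (if !flag && pvGsHit gs x then true else flag)

def filter_instructions_py_alt (instructions : List (List String × String)) (gs_names : List String) : List (List String × String) :=
  pvLoopB gs_names instructions [] [] false

-- ===== PRECONDITION & SPEC =====
-- Pre_ excludes instruction lists containing an unmatched "q" (every suffix must hold at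
-- least as many "Q" as "q" operators): on such malformed streams A's scan runs off the end
-- and re-emits an arbitrary trailing element as a pseudo-Q (it can even duplicate the
-- unmatched q itself), B reattaches the pending content once — both outputs are arbitrary
-- choices on an unspecified corner, so such inputs are outside the claim.
-- number of "q" / "Q" operators in a list of instructions
def pvCntq (l : List (List String × String)) : Nat := l.countP (fun x => x.2 == "q")
def pvCntQ (l : List (List String × String)) : Nat := l.countP (fun x => x.2 == "Q")

def Pre_filter_instructions_py (instructions : List (List String × String)) (gs_names : List String) : Prop :=
  ∀ k ∈ List.range (instructions.length + 1),
      pvCntq (instructions.drop k) ≤ pvCntQ (instructions.drop k)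
instance (instructions : List (List String × String)) (gs_names : List String) : Decidable (Pre_filter_instructions_py instructions gs_names) := by unfold Pre_filter_instructions_py; infer_instance

def pvWitness_filter_instructions_py : (List (List String × String)) × List String :=
  ([(["g1"], "gs"), ([], "q"), (["g1"], "gs"), ([], "re"), ([], "Q"), ([], "q"), ([], "Q")], ["g1"])

def Spec_filter_instructions_py (instructions : List (List String × String)) (gs_names : List String) (out : List (List String × String)) : Prop := out = filter_instructions_py_alt instructions gs_names
instance (instructions : List (List String × String)) (gs_names : List String) (out : List (List String × String)) : Decidable (Spec_filter_instructions_py instructions gs_names out) := by unfold Spec_filter_instructions_py; infer_instance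

-- ===== CLAIM (what is proved, stated in full; the proofs are below) =====
def Claim_equal_filter_instructions_py : Prop := ∀ (instructions : List (List String × String)) (gs_names : List String), Dom_filter_instructions_py instructions gs_names → Pre_filter_instructions_py instructions gs_names → Spec_filter_instructions_py instructions gs_names (filter_instructions_py instructions gs_names)

-- ===== LEMMAS AND PROOFS =====

-- running nesting depth check (the scanned form of the prefix-count condition in Pre_)
def pvBal (d : Int) : List (List String × String) → Bool
  | [] => d == 0
  | x :: xs =>
    let d' := if x.2 = "q" then d + 1 else if x.2 = "Q" then d - 1 else d
    decide (0 ≤ d') && pvBal d' xs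

theorem pvCntq_cons (x : List String × String) (t : List (List String × String)) :
    pvCntq (x :: t) = pvCntq t + (if x.2 = "q" then 1 else 0) := by
  simp [pvCntq, List.countP_cons]

theorem pvCntQ_cons (x : List String × String) (t : List (List String × String)) :
    pvCntQ (x :: t) = pvCntQ t + (if x.2 = "Q" then 1 else 0) := by
  simp [pvCntQ, List.countP_cons]

-- depth after a prefix, and "depth stays ≥ 1 along the prefix"
def pvEnd (d : Int) : List (List String × String) → Int
  | [] => d
  | x :: xs => pvEnd (if x.2 = "q" then d + 1 else if x.2 = "Q" then d - 1 else d) xs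

def pvMin1 (d : Int) : List (List String × String) → Bool
  | [] => true
  | x :: xs =>
    let d' := if x.2 = "q" then d + 1 else if x.2 = "Q" then d - 1 else d
    decide (1 ≤ d') && pvMin1 d' xs

theorem pvScanQ_spec (c : List (List String × String)) :
    ∀ d : Int, 1 ≤ d → pvBal d c = true →
    ∃ body Qe rest, c = body ++ Qe :: rest ∧ pvScanQ d c = (body ++ [Qe], rest) ∧
      Qe.2 = "Q" ∧ pvMin1 d body = true ∧ pvEnd d body = 1 ∧ pvBal 0 rest = true := by
  induction c with
  | nil =>
    intro d hd hb
    simp [pvBal] at hb; omega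
  | cons x xs ih =>
    intro d hd hb
    simp only [pvBal, Bool.and_eq_true, decide_eq_true_eq] at hb
    obtain ⟨hge, hb'⟩ := hb
    by_cases h0 : (if x.2 = "q" then d + 1 else if x.2 = "Q" then d - 1 else d) = 0
    · -- x closes the block
      have hQ : x.2 = "Q" := by
        by_cases hq : x.2 = "q"
        · simp only [if_pos hq] at h0; omega
        · by_cases hQ : x.2 = "Q"
          · exact hQ
          · simp only [if_neg hq, if_neg hQ] at h0; omega
      have hd1 : d = 1 := by
        simp only [if_neg (by rw [hQ]; decide : ¬ x.2 = "q"), if_pos hQ] at h0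
        omega
      refine ⟨[], x, xs, by simp, ?_, hQ, by simp [pvMin1], by simp [pvEnd, hd1], ?_⟩
      · simp only [pvScanQ, if_pos h0]; simp
      · rw [h0] at hb'; exact hb'
    · have h1 : 1 ≤ (if x.2 = "q" then d + 1 else if x.2 = "Q" then d - 1 else d) := by omega
      obtain ⟨body, Qe, rest, hsplit, hscan, hQ, hmin, hend, hbal⟩ := ih _ h1 hb'
      refine ⟨x :: body, Qe, rest, by simp [hsplit], ?_, hQ, ?_, ?_, hbal⟩
      · simp only [pvScanQ, if_neg h0, hscan]; simp
      · simp only [pvMin1, Bool.and_eq_true, decide_eq_true_eq]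
        exact ⟨h1, hmin⟩
      · simpa [pvEnd] using hend

theorem pvBal_of_min1 (body : List (List String × String)) :
    ∀ d : Int, pvMin1 d body = true → pvEnd d body = 1 → pvBal (d - 1) body = true := by
  induction body with
  | nil =>
    intro d _ hend
    simp [pvEnd] at hend
    simp [pvBal, hend]
  | cons x xs ih =>
    intro d hmin hend
    simp only [pvMin1, Bool.and_eq_true, decide_eq_true_eq] at hmin
    obtain ⟨h1, hmin'⟩ := hmin
    simp only [pvEnd] at hend
    simp only [pvBal, Bool.and_eq_true, decide_eq_true_eq]
    have hshift : (if x.2 = "q" then d - 1 + 1 else if x.2 = "Q" then d - 1 - 1 else d - 1)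
        = (if x.2 = "q" then d + 1 else if x.2 = "Q" then d - 1 else d) - 1 := by
      by_cases hq : x.2 = "q"
      · simp only [if_pos hq]; omega
      · by_cases hQ : x.2 = "Q"
        · simp only [if_neg hq, if_pos hQ]
        · simp only [if_neg hq, if_neg hQ]
    refine ⟨?_, ?_⟩
    · rw [hshift]; omega
    · rw [hshift]
      exact ih _ hmin' hend

theorem pvDirect_skip (gs : List String) (body : List (List String × String)) :
    ∀ d : Int, 1 ≤ d → pvMin1 d body = true → ∀ rest,
      pvDirect gs d (body ++ rest) = pvDirect gs (pvEnd d body) rest := by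
  induction body with
  | nil => intro d _ _ rest; simp [pvEnd]
  | cons x xs ih =>
    intro d hd hmin rest
    simp only [pvMin1, Bool.and_eq_true, decide_eq_true_eq] at hmin
    obtain ⟨h1, hmin'⟩ := hmin
    simp only [List.cons_append, pvDirect, pvEnd]
    by_cases hq : x.2 = "q"
    · simp only [if_pos hq] at h1 hmin' ⊢
      exact ih _ (by omega) hmin' rest
    · by_cases hQ : x.2 = "Q"
      · simp only [if_neg hq, if_pos hQ] at h1 hmin' ⊢
        exact ih _ h1 hmin' rest
      · simp only [if_neg hq, if_neg hQ] at h1 hmin' ⊢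
        have hd0 : (pvGsHit gs x && d == 0) = false := by
          have hz : (d == (0 : Int)) = false := by simp; omega
          simp [hz]
        simp only [hd0, Bool.false_eq_true, if_false]
        exact ih _ h1 hmin' rest

theorem pvLoopB_chunk (gs : List String) :
    ∀ (n : Nat) (c : List (List String × String)), c.length ≤ n → pvBal 0 c = true →
    ∀ (xs : List (List String × String)) stack items flag,
      pvLoopB gs (c ++ xs) stack items flag
        = pvLoopB gs xs stack (items ++ filter_instructions_py c gs) (flag || pvDirect gs 0 c) := by
  intro n
  induction n with
  | zero =>
    intro c hc _ xs stack items flag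
    have : c = [] := by simpa using List.eq_nil_of_length_eq_zero (Nat.le_zero.mp hc)
    subst this
    simp [filter_instructions_py, pvDirect]
  | succ n ih =>
    intro c hc hbal xs stack items flag
    match c with
    | [] => simp [filter_instructions_py, pvDirect]
    | x :: c' =>
      by_cases hq : x.2 = "q"
      · -- q opens a block
        have hb1 : pvBal 1 c' = true := by
          simpa [pvBal, hq] using hbal
        obtain ⟨body, Qe, rest, hsplit, hscan, hQ, hmin, hend, hbrest⟩ :=
          pvScanQ_spec c' 1 (le_refl 1) hb1
        have hbbody : pvBal 0 body = true := by
          simpa using pvBal_of_min1 body 1 hmin hend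
        have hlenc' : c'.length ≤ n := by simpa using hc
        have hlbody : body.length ≤ n := by
          subst hsplit; simp at hlenc'; omega
        have hlrest : rest.length ≤ n := by
          subst hsplit; simp at hlenc'; omega
        -- A's value on x :: c'
        have hQne : ¬ Qe.2 = "q" := by rw [hQ]; decide
        have hDa : pvDirect gs 0 (x :: c') = pvDirect gs 0 rest := by
          have h1 : pvDirect gs 0 (x :: c') = pvDirect gs 1 (body ++ Qe :: rest) := by
            simp [pvDirect, hq, hsplit]
          rw [h1, pvDirect_skip gs body 1 (le_refl 1) hmin, hend]
          simp [pvDirect, hQ]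
        have hFa : filter_instructions_py (x :: c') gs
            = if pvDirect gs 0 body then filter_instructions_py rest gs
              else x :: (filter_instructions_py body gs ++ Qe :: filter_instructions_py rest gs) := by
          rw [filter_instructions_py]
          simp only [if_pos hq, hscan]
          rw [List.dropLast_concat, List.getLastD_concat]
        -- B's pass
        have hL : pvLoopB gs ((x :: c') ++ xs) stack items flag
            = pvLoopB gs (body ++ (Qe :: (rest ++ xs))) ((items, flag, x) :: stack) [] false := by
          simp [pvLoopB, hq, hsplit]
        rw [hL, ih body hlbody hbbody]
        simp only [List.nil_append, Bool.false_or]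
        have hstep : pvLoopB gs (Qe :: (rest ++ xs)) ((items, flag, x) :: stack)
              (filter_instructions_py body gs) (pvDirect gs 0 body)
            = pvLoopB gs (rest ++ xs) stack
              (if pvDirect gs 0 body then items
               else items ++ x :: (filter_instructions_py body gs ++ [Qe])) flag := by
          simp [pvLoopB, hQ]
        rw [hstep, ih rest hlrest hbrest]
        rw [hFa, hDa]
        by_cases hdb : pvDirect gs 0 body
        · simp [hdb]
        · simp [hdb]
      · -- plain operator (not q; balance rules out Q at depth 0)
        have hb0 : (0 ≤ (if x.2 = "q" then (0:Int) + 1 else if x.2 = "Q" then 0 - 1 else 0))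
            ∧ pvBal (if x.2 = "q" then (0:Int) + 1 else if x.2 = "Q" then 0 - 1 else 0) c' = true := by
          simpa [pvBal] using hbal
        have hQne : ¬ x.2 = "Q" := by
          intro hQ'
          have := hb0.1
          simp [hQ'] at this
        have hbc' : pvBal 0 c' = true := by
          have := hb0.2
          simpa [hq, hQne] using this
        have hlen : c'.length ≤ n := by simpa using hc
        have hL : pvLoopB gs ((x :: c') ++ xs) stack items flag
            = pvLoopB gs (c' ++ xs) stack (items ++ [x])
                (if !flag && pvGsHit gs x then true else flag) := by
          simp [pvLoopB, hq, hQne]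
        rw [hL, ih c' hlen hbc']
        have hFa : filter_instructions_py (x :: c') gs = x :: filter_instructions_py c' gs := by
          rw [filter_instructions_py]; simp [hq]
        have hDa : pvDirect gs 0 (x :: c')
            = (pvGsHit gs x || pvDirect gs 0 c') := by
          simp only [pvDirect, hq, hQne, if_false]
          by_cases hg : pvGsHit gs x <;> simp [hg]
        rw [hFa, hDa]
        have hflag : ((if !flag && pvGsHit gs x then true else flag) || pvDirect gs 0 c')
            = (flag || (pvGsHit gs x || pvDirect gs 0 c')) := by
          cases flag <;> cases pvGsHit gs x <;> simp
        rw [hflag]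
        simp

-- unbounded form of the suffix-count condition in Pre_
def pvSC (l : List (List String × String)) : Prop :=
  ∀ k : Nat, pvCntq (l.drop k) ≤ pvCntQ (l.drop k)

theorem pvSC_of_pre (l : List (List String × String))
    (h : ∀ k ∈ List.range (l.length + 1), pvCntq (l.drop k) ≤ pvCntQ (l.drop k)) : pvSC l := by
  intro k
  by_cases hk : k ≤ l.length
  · exact h k (List.mem_range.mpr (by omega))
  · rw [List.drop_of_length_le (by omega)]
    simp [pvCntq, pvCntQ]

theorem pvSC_suffix (a b : List (List String × String)) (h : pvSC (a ++ b)) : pvSC b := by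
  intro k
  have := h (a.length + k)
  rw [List.drop_append] at this
  simp only [List.drop_of_length_le (Nat.le_add_right a.length k),
    Nat.add_sub_cancel_left, List.nil_append] at this
  exact this

-- a q opened at depth d ≥ 1 is closed if the suffix holds enough "Q"
theorem pvSplitSC (t : List (List String × String)) :
    ∀ d : Int, 1 ≤ d → d + (pvCntq t : Int) ≤ (pvCntQ t : Int) →
    ∃ body Qe rest, t = body ++ Qe :: rest ∧ Qe.2 = "Q" ∧
      pvMin1 d body = true ∧ pvEnd d body = 1 := by
  induction t with
  | nil =>
    intro d hd hcnt
    exfalso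
    simp [pvCntq, pvCntQ] at hcnt
    omega
  | cons x xs ih =>
    intro d hd hcnt
    have F1 : (if x.2 = "q" then d + 1 else if x.2 = "Q" then d - 1 else d)
        = d + ((if x.2 = "q" then (1:Int) else 0) - (if x.2 = "Q" then (1:Int) else 0)) := by
      by_cases hq : x.2 = "q"
      · simp only [if_pos hq, if_neg (by rw [hq]; decide : ¬ x.2 = "Q")]; omega
      · by_cases hQ : x.2 = "Q"
        · simp only [if_neg hq, if_pos hQ]; omega
        · simp only [if_neg hq, if_neg hQ]; omega
    have hc : (pvCntq (x :: xs) : Int) = (pvCntq xs : Int) + (if x.2 = "q" then (1:Int) else 0) := by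
      rw [pvCntq_cons]; by_cases hq : x.2 = "q" <;> simp [hq]
    have hC : (pvCntQ (x :: xs) : Int) = (pvCntQ xs : Int) + (if x.2 = "Q" then (1:Int) else 0) := by
      rw [pvCntQ_cons]; by_cases hQ : x.2 = "Q" <;> simp [hQ]
    by_cases h0 : (if x.2 = "q" then d + 1 else if x.2 = "Q" then d - 1 else d) = 0
    · -- x closes the scan: it must be a "Q" met at depth 1
      have hQ : x.2 = "Q" := by
        by_cases hq : x.2 = "q"
        · simp only [if_pos hq] at h0; omega
        · by_cases hQ : x.2 = "Q"
          · exact hQ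
          · simp only [if_neg hq, if_neg hQ] at h0; omega
      have hd1 : d = 1 := by
        simp only [if_neg (by rw [hQ]; decide : ¬ x.2 = "q"), if_pos hQ] at h0
        omega
      exact ⟨[], x, xs, by simp, hQ, by simp [pvMin1], by simp [pvEnd, hd1]⟩
    · have h1 : 1 ≤ (if x.2 = "q" then d + 1 else if x.2 = "Q" then d - 1 else d) := by
        rw [F1] at h0 ⊢
        by_cases hq : x.2 = "q"
        · simp only [if_pos hq, if_neg (by rw [hq]; decide : ¬ x.2 = "Q")] at h0 ⊢; omega
        · by_cases hQ : x.2 = "Q"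
          · simp only [if_neg hq, if_pos hQ] at h0 ⊢; omega
          · simp only [if_neg hq, if_neg hQ] at h0 ⊢; omega
      have hcnt' : (if x.2 = "q" then d + 1 else if x.2 = "Q" then d - 1 else d)
          + (pvCntq xs : Int) ≤ (pvCntQ xs : Int) := by
        rw [F1]; omega
      obtain ⟨body, Qe, rest, hsplit, hQ, hmin, hend⟩ := ih _ h1 hcnt'
      refine ⟨x :: body, Qe, rest, by simp [hsplit], hQ, ?_, ?_⟩
      · simp only [pvMin1, Bool.and_eq_true, decide_eq_true_eq]
        exact ⟨h1, hmin⟩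
      · simpa [pvEnd] using hend

-- a closed block body ++ [Qe] is balanced from its opening depth
theorem pvBal_concatQ (body : List (List String × String)) :
    ∀ d : Int, pvMin1 d body = true → pvEnd d body = 1 →
    ∀ Qe : List String × String, Qe.2 = "Q" → pvBal d (body ++ [Qe]) = true := by
  induction body with
  | nil =>
    intro d _ hend Qe hQ
    have hd1 : d = 1 := by simpa [pvEnd] using hend
    simp [pvBal, if_neg (by rw [hQ]; decide : ¬ Qe.2 = "q"), if_pos hQ, hd1]
  | cons x xs ih =>
    intro d hmin hend Qe hQ
    simp only [pvMin1, Bool.and_eq_true, decide_eq_true_eq] at hmin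
    obtain ⟨h1, hmin'⟩ := hmin
    simp only [pvEnd] at hend
    simp only [List.cons_append, pvBal, Bool.and_eq_true, decide_eq_true_eq]
    exact ⟨by omega, ih _ hmin' hend Qe hQ⟩

-- the scan consumes exactly the closed block, whatever follows
theorem pvScanQ_exact (body : List (List String × String)) :
    ∀ d : Int, pvMin1 d body = true → pvEnd d body = 1 →
    ∀ (Qe : List String × String), Qe.2 = "Q" →
    ∀ r, pvScanQ d (body ++ Qe :: r) = (body ++ [Qe], r) := by
  induction body with
  | nil =>
    intro d _ hend Qe hQ r
    have hd1 : d = 1 := by simpa [pvEnd] using hend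
    simp only [List.nil_append, pvScanQ,
      if_neg (by rw [hQ]; decide : ¬ Qe.2 = "q"), if_pos hQ, hd1]
    simp
  | cons x xs ih =>
    intro d hmin hend Qe hQ r
    simp only [pvMin1, Bool.and_eq_true, decide_eq_true_eq] at hmin
    obtain ⟨h1, hmin'⟩ := hmin
    simp only [pvEnd] at hend
    simp only [List.cons_append, pvScanQ]
    rw [if_neg (by omega : ¬ (if x.2 = "q" then d + 1 else if x.2 = "Q" then d - 1 else d) = 0)]
    rw [ih _ hmin' hend Qe hQ r]

-- top level: no enclosing q, so stray "Q"s are plain items for both programs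
theorem pvLoopB_top (gs : List String) :
    ∀ (n : Nat) (l : List (List String × String)), l.length ≤ n → pvSC l →
    ∀ items flag, pvLoopB gs l [] items flag = items ++ filter_instructions_py l gs := by
  intro n
  induction n with
  | zero =>
    intro l hl _ items flag
    have : l = [] := by simpa using List.eq_nil_of_length_eq_zero (Nat.le_zero.mp hl)
    subst this
    simp [pvLoopB, pvUnwind, filter_instructions_py]
  | succ n ih =>
    intro l hl hsc items flag
    match l with
    | [] => simp [pvLoopB, pvUnwind, filter_instructions_py]
    | x :: t =>
      by_cases hq : x.2 = "q"
      · -- the q is closed somewhere in t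
        have hcnt : (1 : Int) + (pvCntq t : Int) ≤ (pvCntQ t : Int) := by
          have h0 := hsc 0
          simp only [List.drop_zero] at h0
          rw [pvCntq_cons, pvCntQ_cons, if_pos hq,
            if_neg (by rw [hq]; decide : ¬ x.2 = "Q")] at h0
          omega
        obtain ⟨body, Qe, rest, hsplit, hQ, hmin, hend⟩ := pvSplitSC t 1 le_rfl hcnt
        have hbalc : pvBal 0 (x :: (body ++ [Qe])) = true := by
          simp only [pvBal, if_pos hq, Bool.and_eq_true, decide_eq_true_eq]
          exact ⟨by omega, pvBal_concatQ body 1 hmin hend Qe hQ⟩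
        have hlc : (x :: (body ++ [Qe])).length ≤ n + 1 := by
          subst hsplit; simp at hl ⊢; omega
        have hlrest : rest.length ≤ n := by
          subst hsplit; simp at hl; omega
        have hscrest : pvSC rest := by
          have h1 : pvSC t := pvSC_suffix [x] t (by simpa using hsc)
          rw [hsplit] at h1
          exact pvSC_suffix (body ++ [Qe]) rest (by simpa using h1)
        have hchunk := pvLoopB_chunk gs (n + 1) (x :: (body ++ [Qe])) hlc hbalc
            rest [] items flag
        have hl' : x :: t = (x :: (body ++ [Qe])) ++ rest := by simp [hsplit]
        -- A splits the same way: the scan stops at Qe in both readings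
        have hFa1 : filter_instructions_py (x :: t) gs
            = if pvDirect gs 0 body then filter_instructions_py rest gs
              else x :: (filter_instructions_py body gs ++ Qe :: filter_instructions_py rest gs) := by
          rw [filter_instructions_py]
          simp only [if_pos hq, hsplit, pvScanQ_exact body 1 hmin hend Qe hQ rest]
          rw [List.dropLast_concat, List.getLastD_concat]
        have hFa2 : filter_instructions_py (x :: (body ++ [Qe])) gs
            = if pvDirect gs 0 body then []
              else x :: (filter_instructions_py body gs ++ [Qe]) := by
          rw [filter_instructions_py]
          have hsc2 : pvScanQ 1 (body ++ [Qe]) = (body ++ [Qe], []) :=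
            pvScanQ_exact body 1 hmin hend Qe hQ []
          simp only [if_pos hq, hsc2]
          rw [List.dropLast_concat, List.getLastD_concat]
          simp [filter_instructions_py]
        rw [hFa1, hl', hchunk, ih rest hlrest hscrest, hFa2]
        by_cases hdb : pvDirect gs 0 body
        · simp [hdb]
        · simp [hdb]
      · -- plain item (possibly a stray Q: the stack is empty, both keep it)
        have hsct : pvSC t := pvSC_suffix [x] t (by simpa using hsc)
        have hlt : t.length ≤ n := by simpa using hl
        have hFa : filter_instructions_py (x :: t) gs = x :: filter_instructions_py t gs := by
          rw [filter_instructions_py]; simp [hq]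
        by_cases hQ : x.2 = "Q"
        · have hL : pvLoopB gs (x :: t) [] items flag = pvLoopB gs t [] (items ++ [x]) flag := by
            simp [pvLoopB, hq, hQ]
          rw [hL, ih t hlt hsct, hFa]
          simp
        · have hL : pvLoopB gs (x :: t) [] items flag
              = pvLoopB gs t [] (items ++ [x])
                  (if !flag && pvGsHit gs x then true else flag) := by
            simp [pvLoopB, hq, hQ]
          rw [hL, ih t hlt hsct, hFa]
          simp

-- ===== VERDICT (by name: the statement is the Claim_ definition above) =====
theorem filter_instructions_py_spec : Claim_equal_filter_instructions_py := by
  intro instructions gs_names _hdom hpre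
  unfold Spec_filter_instructions_py
  have hsc := pvSC_of_pre instructions hpre
  unfold filter_instructions_py_alt
  rw [pvLoopB_top gs_names instructions.length instructions (le_refl _) hsc [] false]
  simp
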